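/-
  LEMMAS ABOUT THE VOCABULARY OF ProgX/Spec/Basic.lean that several statement writers of stb_vorbis each needed (the generic part
  of proofs.vorbis/Vorbis/Spec/Common.lean; its block / arena / decoder parts stay there).

      LiveIn.mono                  a live range stays live when the lists of live objects grow
      ShadowPre.call               the shadow clause of a callee's precondition, from the caller's
      stackObj_range               a stack object of an active protected frame lies in the stack region
      liveIn_reframe               a one-object live range off the stack region is live under any list of active frames
      StackObj others frames p n   a live object of a caller's stack frame (an out-pointer)

  ELSEWHERE: the 32-bit argument vocabulary (`sint32`, `s32`, `argInt`, `arg32`, `cnt32_*`, `rd`) is ProgX/Words.lean; `Mem.readLE_prefix` and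
  friends UserX/MemLemmas.lean; `Asan.shadowAddr_granule_add`, the heap's client facts Asan/HeapLemmas.lean; more `LiveIn` lemmas (`push`,
  `of_nil`, `rest_heap`, `own`, `below_next` …) and `HeapPre` at a callee's entry ProgX/Spec/HeapLemmas.lean; the protected frame's
  prologue and epilogue ProgX/Spec/FrameCarry.lean.
-/
import ProgX.Spec.Basic
namespace ProgX
open X86 X86.User Asan

/-- A live range stays live when the lists of live objects grow (a protected frame was pushed, a block was allocated). -/
theorem LiveIn.mono {others others' : List Obj} {frames frames' : List (Nat × FrameLayout)} {a n : Nat}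
    (h : LiveIn others frames a n) (hsub : ∀ o, o ∈ stackObjs frames ++ others → o ∈ stackObjs frames' ++ others') :
    LiveIn others' frames' a n := by
  obtain ⟨o, ho, h1, h2⟩ := h
  exact ⟨o, hsub o ho, h1, h2⟩

/-- **THE SHADOW CLAUSE OF A CALLEE'S PRECONDITION, from the caller's**: the caller was entered at `u` with `ShadowPre`, has
written no shadow byte since (`hun`: `by v_untouched`), and stands at `s`, the callee's first instruction, with its stack pointer
below its own entry stack pointer (it pushed at least the return address). -/
theorem ShadowPre.call {T : Text} {others : List Obj} {frames : List (Nat × FrameLayout)} {u s : State}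
    (h : ShadowPre T others frames u) (hun : ShadowUntouched u.mem s.mem) (hle : (s.reg .rsp).toNat ≤ (u.reg .rsp).toNat)
    (h8 : (s.reg .rsp).toNat % 8 = 0) (hlo : 0x700000 ≤ (s.reg .rsp).toNat + 8) : ShadowPre T others frames s :=
  h.callee hun hle h8 hlo

/-- A stack object of an active protected frame lies in the stack region. -/
theorem stackObj_range {others : List Obj} {frames : List (Nat × FrameLayout)} {top : Nat} {mem : Mem}
    (hinv : ShadowInv others frames top mem) {o : Obj} (ho : o ∈ stackObjs frames) :
    0x700000 ≤ o.base ∧ (o.base + o.size + 7) / 8 * 8 ≤ 0x800000 := by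
  obtain ⟨bF, hbF, g1, g2⟩ := ShadowInv.stackObj_gran hinv.stack ho
  obtain ⟨_, a8, atop, ahi, _⟩ := hinv.stack.active bF hbF
  have hlo := hinv.stack.lo
  have e1 : o.gLo = o.base / 8 := rfl
  have e2 : o.gHi = (o.base + o.size + 7) / 8 := rfl
  omega

/-- A one-object live range off the stack region lies in one of the `others`: it is live under any list of frames. -/
theorem liveIn_reframe {others : List Obj} {frames frames' : List (Nat × FrameLayout)} {top : Nat} {mem : Mem}
    (hinv : ShadowInv others frames top mem) {a n : Nat} (h : LiveIn others frames a n) (hn : 0 < n)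
    (hoff : a + n ≤ 0x700000 ∨ 0x800000 ≤ a) : LiveIn others frames' a n := by
  obtain ⟨o, ho, h1, h2⟩ := h
  rcases List.mem_append.mp ho with hs | hoth
  · have hr := stackObj_range hinv hs
    omega
  · exact ⟨o, List.mem_append_right _ hoth, h1, h2⟩

/-- **A live object of a caller's stack frame**: the `n` bytes at `p` lie inside ONE live object, in the stack region (an
out-pointer such as `&err`, `&len`). -/
def StackObj (others : List Obj) (frames : List (Nat × FrameLayout)) (p n : Nat) : Prop :=
  LiveIn others frames p n ∧ 0x700000 ≤ p ∧ p + n ≤ 0x800000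

end ProgX
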